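-- pv_equiv track=rewrite | github.com/unkreative/coding | menu versions/menu v4.0.py | wordsToList
-- ===== SOURCE A (Python) =====
-- def wordsToList(strn):
--     L = strn.split()
--     cleanL = []
--     abc1 = "abcdefghijklmnopqrstuvwxyz"
--     abc = "=:;âôûéáœâà«»’°|ç'ïäöüè/%+^¨&<>§ëöÿÏÖÜË('^)1234567890!-_" + abc1
--     ABC = abc1.upper()
--     letters = abc + ABC
--     for e in L:
--         word = ''
--         for c in e:
--             if c in letters:
--                 word += c
--         if word != '':
--             cleanL.append(word)
--     return cleanL
-- ===== SOURCE B (Python) =====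
-- def wordsToList(strn):
--     letters = ("=:;âôûéáœâà«»’°|ç'ïäöüè/%+^¨&<>§ëöÿÏÖÜË('^)1234567890!-_"
--                "abcdefghijklmnopqrstuvwxyzABCDEFGHIJKLMNOPQRSTUVWXYZ")
--     out = []
--     cur = []
--     for c in strn:
--         if c.isspace():
--             if cur:
--                 out.append(''.join(cur))
--                 cur = []
--         elif c in letters:
--             cur.append(c)
--     if cur:
--         out.append(''.join(cur))
--     return out
-- ===== Notes on version B (the rewrite author's own statement) =====
-- stated objective: alternative
-- what changed: Replaced split()-then-per-word-filter (two nested loops over an intermediate word list) with a single left-to-right state-machine pass over the characters: whitespace flushes the current filtered word, an allowed character extends it, anything else is skipped; no split() and no intermediate word list.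
import Mathlib
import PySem

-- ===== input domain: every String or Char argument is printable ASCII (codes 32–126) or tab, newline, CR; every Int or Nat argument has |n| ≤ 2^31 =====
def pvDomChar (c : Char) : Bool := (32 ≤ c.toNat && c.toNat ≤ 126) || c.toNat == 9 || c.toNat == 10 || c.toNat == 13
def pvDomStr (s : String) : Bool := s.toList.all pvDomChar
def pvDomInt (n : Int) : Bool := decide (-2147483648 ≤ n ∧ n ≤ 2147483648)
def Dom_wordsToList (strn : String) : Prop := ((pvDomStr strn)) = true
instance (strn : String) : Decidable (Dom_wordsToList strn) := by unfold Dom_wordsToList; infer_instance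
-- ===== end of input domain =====

-- B replaces A's split-then-filter-each-word structure with a single left-to-right
-- state-machine pass over the characters (alternative decomposition, no split()).

-- ===== PORT A =====
-- A: split, then nested loops building `word` char-by-char and `cleanL` word-by-word.
def wordsToList (strn : String) : List String :=
  let L := PySem.Str.split₀ strn
  let abc1 : String := "abcdefghijklmnopqrstuvwxyz"
  let abc : String := "=:;âôûéáœâà«»’°|ç'ïäöüè/%+^¨&<>§ëöÿÏÖÜË('^)1234567890!-_" ++ abc1
  let ABC : String := PySem.Str.upper abc1
  let letters : String := abc ++ ABC
  L.foldl (fun cleanL e =>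
    let word : List Char :=
      e.toList.foldl (fun word c => if letters.toList.contains c then word ++ [c] else word) []
    if String.ofList word ≠ "" then cleanL ++ [String.ofList word] else cleanL) []

-- ===== PORT B =====
-- B: one pass over the characters; whitespace flushes the current (already filtered)
-- word, an allowed character extends it, anything else is skipped.
def pvStepB (letters : List Char) (st : List String × List Char) (c : Char) :
    List String × List Char :=
  if PySem.Chars.isspace c then
    (if st.2 ≠ [] then (st.1 ++ [String.ofList st.2], ([] : List Char)) else st)
  else if letters.contains c then (st.1, st.2 ++ [c])
  else st

def wordsToList_alt (strn : String) : List String :=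
  let letters : List Char :=
    "=:;âôûéáœâà«»’°|ç'ïäöüè/%+^¨&<>§ëöÿÏÖÜË('^)1234567890!-_abcdefghijklmnopqrstuvwxyzABCDEFGHIJKLMNOPQRSTUVWXYZ".toList
  let st := strn.toList.foldl (pvStepB letters) ([], [])
  if st.2 ≠ [] then st.1 ++ [String.ofList st.2] else st.1

-- ===== PRECONDITION & SPEC =====
def Spec_wordsToList (strn : String) (out : List String) : Prop := out = wordsToList_alt strn
instance (strn : String) (out : List String) : Decidable (Spec_wordsToList strn out) := by unfold Spec_wordsToList; infer_instance

-- ===== CLAIM (what is proved, stated in full; the proofs are below) =====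
def Claim_equal_wordsToList : Prop := ∀ (strn : String), Dom_wordsToList strn → Spec_wordsToList strn (wordsToList strn)

-- ===== LEMMAS AND PROOFS =====

-- the cleaned words, at the char-list level
def pvClean (p : Char → Bool) (L : List (List Char)) : List String :=
  ((L.map (fun w => w.filter p)).filter (fun w => w ≠ [])).map String.ofList

theorem pvClean_append (p : Char → Bool) (L M : List (List Char)) :
    pvClean p (L ++ M) = pvClean p L ++ pvClean p M := by
  simp [pvClean]

-- split₀.go equations
theorem pvGo_nil (cur : List Char) (acc : List (List Char)) :
    PySem.Chars.split₀.go [] cur acc =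
      if cur.isEmpty then acc.reverse else (cur.reverse :: acc).reverse := by
  simp [PySem.Chars.split₀.go]

theorem pvGo_cons (c : Char) (s cur : List Char) (acc : List (List Char)) :
    PySem.Chars.split₀.go (c :: s) cur acc =
      if PySem.Chars.isspace c then
        (if cur.isEmpty then PySem.Chars.split₀.go s [] acc
         else PySem.Chars.split₀.go s [] (cur.reverse :: acc))
      else PySem.Chars.split₀.go s (c :: cur) acc := by
  simp [PySem.Chars.split₀.go]

-- the accumulator of go is a prefix
theorem pvGo_acc (s : List Char) : ∀ (cur : List Char) (acc : List (List Char)),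
    PySem.Chars.split₀.go s cur acc = acc.reverse ++ PySem.Chars.split₀.go s cur [] := by
  induction s with
  | nil =>
    intro cur acc
    rw [pvGo_nil, pvGo_nil]
    by_cases h : cur.isEmpty <;> simp [h]
  | cons c s ih =>
    intro cur acc
    rw [pvGo_cons, pvGo_cons]
    by_cases hws : PySem.Chars.isspace c
    · by_cases h : cur.isEmpty
      · simp only [hws, h, if_pos]
        exact ih [] acc
      · simp only [hws, h, if_neg, if_pos, Bool.false_eq_true, not_false_iff]
        rw [ih [] (cur.reverse :: acc), ih [] [cur.reverse]]
        simp
    · simp only [hws, if_neg, Bool.false_eq_true, not_false_iff]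
      exact ih (c :: cur) acc

-- one step of B keeps the already-emitted words as a prefix
theorem pvStepB_out (p : List Char) (out : List String) (cur : List Char) (c : Char) :
    pvStepB p (out, cur) c =
      ((out ++ (pvStepB p ([], cur) c).1, (pvStepB p ([], cur) c).2)) := by
  unfold pvStepB
  split_ifs <;> simp

-- the fold of B keeps the already-emitted words as a prefix
theorem pvFoldB_out (p : List Char) (s : List Char) :
    ∀ (out : List String) (cur : List Char),
    s.foldl (pvStepB p) (out, cur) =
      (out ++ (s.foldl (pvStepB p) ([], cur)).1, (s.foldl (pvStepB p) ([], cur)).2) := by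
  induction s with
  | nil => intro out cur; simp
  | cons c s ih =>
    intro out cur
    rw [List.foldl_cons, List.foldl_cons, pvStepB_out]
    rw [ih (out ++ (pvStepB p ([], cur) c).1) (pvStepB p ([], cur) c).2,
        ih (pvStepB p ([], cur) c).1 (pvStepB p ([], cur) c).2]
    simp

theorem pvClean_single (p : Char → Bool) (w : List Char) :
    pvClean p [w] = if w.filter p = [] then [] else [String.ofList (w.filter p)] := by
  by_cases h : w.filter p = [] <;> simp [pvClean, h]

-- B's final flush, as a helper for the proofs
def pvFlush (st : List String × List Char) : List String :=
  if st.2 ≠ [] then st.1 ++ [String.ofList st.2] else st.1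

theorem pvFlush_append (w : List String) (st : List String × List Char) :
    pvFlush (w ++ st.1, st.2) = w ++ pvFlush st := by
  unfold pvFlush; by_cases h : st.2 = [] <;> simp [h]

-- MAIN: B's single pass computes the clean of go
theorem pvMain (p : List Char) (s : List Char) : ∀ (rcur : List Char),
    pvFlush (s.foldl (pvStepB p) ([], rcur.reverse.filter p.contains))
      = pvClean p.contains (PySem.Chars.split₀.go s rcur []) := by
  induction s with
  | nil =>
    intro rcur
    rw [List.foldl_nil, pvGo_nil]
    by_cases h : rcur.isEmpty = true
    · have : rcur = [] := by simpa [List.isEmpty_iff] using h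
      subst this; simp [pvFlush, pvClean]
    · rw [if_neg h]
      simp only [List.reverse_cons, List.reverse_nil, List.nil_append]
      rw [pvClean_single]
      unfold pvFlush
      by_cases hf : rcur.reverse.filter p.contains = []
      · rw [if_neg (not_not_intro hf), if_pos hf]
      · rw [if_pos hf, if_neg hf, List.nil_append]
  | cons c s ih =>
    intro rcur
    rw [List.foldl_cons, pvGo_cons]
    by_cases hsp : PySem.Chars.isspace c = true
    · by_cases h : rcur.isEmpty = true
      · have : rcur = [] := by simpa [List.isEmpty_iff] using h
        subst this
        rw [if_pos hsp, if_pos h]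
        have hstep : pvStepB p ([], ([] : List Char).reverse.filter p.contains) c
            = ([], ([] : List Char).reverse.filter p.contains) := by
          unfold pvStepB; simp [hsp]
        rw [hstep]
        exact ih []
      · rw [if_pos hsp, if_neg h]
        rw [pvGo_acc s [] [rcur.reverse]]
        simp only [List.reverse_cons, List.reverse_nil, List.nil_append]
        rw [pvClean_append, pvClean_single]
        by_cases hf : rcur.reverse.filter p.contains = []
        · have hstep : pvStepB p ([], rcur.reverse.filter p.contains) c
              = ([], ([] : List Char).reverse.filter p.contains) := by
            unfold pvStepB; simp [hsp, hf]
          rw [hstep, if_pos hf, List.nil_append]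
          exact ih []
        · have hstep : pvStepB p ([], rcur.reverse.filter p.contains) c
              = ([String.ofList (rcur.reverse.filter p.contains)],
                 ([] : List Char).reverse.filter p.contains) := by
            unfold pvStepB; rw [if_pos hsp, if_pos hf]; simp
          rw [hstep, if_neg hf, pvFoldB_out, pvFlush_append, ih []]
    · rw [if_neg hsp]
      by_cases hpc : p.contains c = true
      · have hstep : pvStepB p ([], rcur.reverse.filter p.contains) c
            = ([], (c :: rcur).reverse.filter p.contains) := by
          have hm : c ∈ p := by simpa using hpc
          unfold pvStepB
          simp [hsp, hm, List.reverse_cons, List.filter_append]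
        rw [hstep]
        exact ih (c :: rcur)
      · have hstep : pvStepB p ([], rcur.reverse.filter p.contains) c
            = ([], (c :: rcur).reverse.filter p.contains) := by
          have hm : c ∉ p := by simpa using hpc
          unfold pvStepB
          simp [hsp, hm, List.reverse_cons, List.filter_append]
        rw [hstep]
        exact ih (c :: rcur)

-- A's inner char loop is a filter.
theorem pvInnerLoop (p : Char → Bool) (l acc : List Char) :
    l.foldl (fun word c => if p c then word ++ [c] else word) acc = acc ++ l.filter p := by
  induction l generalizing acc with
  | nil => simp
  | cons c l ih =>
    by_cases h : p c <;> simp [List.foldl_cons, h, ih]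

-- A's outer word loop is a filter of a map.
theorem pvOuterLoop (g : String → String) (L acc : List String) :
    L.foldl (fun cleanL e => if g e ≠ "" then cleanL ++ [g e] else cleanL) acc
      = acc ++ (L.map g).filter (fun w => w ≠ "") := by
  induction L generalizing acc with
  | nil => simp
  | cons e L ih =>
    rw [List.foldl_cons, ih]
    by_cases h : g e = "" <;> simp [h]

-- A as the clean of go (at the char level)
theorem pvA_clean (s : List Char) (p : Char → Bool) :
    ((((PySem.Chars.split₀.go s [] []).map String.ofList).map
        (fun e => String.ofList (e.toList.filter p))).filter (fun w => w ≠ ""))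
      = pvClean p (PySem.Chars.split₀.go s [] []) := by
  simp only [pvClean, List.map_map, List.filter_map]
  congr 1
  · funext w; simp
  · congr 1
    funext w
    simp [Function.comp]

-- the two letter alphabets are the same list of characters
set_option maxRecDepth 100000 in
theorem pvLettersEq :
    ("=:;âôûéáœâà«»’°|ç'ïäöüè/%+^¨&<>§ëöÿÏÖÜË('^)1234567890!-_" ++ "abcdefghijklmnopqrstuvwxyz"
      ++ PySem.Str.upper "abcdefghijklmnopqrstuvwxyz").toList
    = "=:;âôûéáœâà«»’°|ç'ïäöüè/%+^¨&<>§ëöÿÏÖÜË('^)1234567890!-_abcdefghijklmnopqrstuvwxyzABCDEFGHIJKLMNOPQRSTUVWXYZ".toList := by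
  rfl

-- ===== VERDICT (by name: the statement is the Claim_ definition above) =====
set_option maxRecDepth 100000 in
theorem wordsToList_spec : Claim_equal_wordsToList := by
  intro strn _
  unfold Spec_wordsToList wordsToList wordsToList_alt
  simp only [pvInnerLoop, pvOuterLoop, List.nil_append]
  rw [PySem.Str.split₀]
  unfold PySem.Chars.split₀
  rw [pvLettersEq, pvA_clean]
  have h := pvMain "=:;âôûéáœâà«»’°|ç'ïäöüè/%+^¨&<>§ëöÿÏÖÜË('^)1234567890!-_abcdefghijklmnopqrstuvwxyzABCDEFGHIJKLMNOPQRSTUVWXYZ".toList strn.toList []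
  simpa [pvFlush] using h.symm
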